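-- pv_equiv track=rewrite | github.com/SakshyamKarki/DrishtiAI | backend/detection/services/lbp.py | _is_uniform
-- ===== SOURCE A (Python) =====
-- def _is_uniform(code: int, P: int) -> bool:
--     transitions = 0
--     prev_bit = (code >> (P - 1)) & 1
--     for k in range(P):
--         curr_bit = (code >> k) & 1
--         if curr_bit != prev_bit:
--             transitions += 1
--         prev_bit = curr_bit
--     return transitions <= 2
-- ===== SOURCE B (Python) =====
-- def _is_uniform(code: int, P: int) -> bool:
--     c = code & ((1 << P) - 1)
--     x = c ^ ((c >> 1) | ((c & 1) << (P - 1)))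
--     x &= x - 1
--     x &= x - 1
--     return x == 0
-- ===== Notes on version B (the rewrite author's own statement) =====
-- stated objective: faster
-- what changed: Replaces the explicit per-bit transition-counting loop (shift, mask, compare, accumulate for each of the P bits) by a constant number of whole-word bitwise operations: XOR the masked code with its circular right rotation over the low P bits, then clear the two lowest set bits (x &= x-1 twice, Kernighan's trick) and test for zero.
import Mathlib
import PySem

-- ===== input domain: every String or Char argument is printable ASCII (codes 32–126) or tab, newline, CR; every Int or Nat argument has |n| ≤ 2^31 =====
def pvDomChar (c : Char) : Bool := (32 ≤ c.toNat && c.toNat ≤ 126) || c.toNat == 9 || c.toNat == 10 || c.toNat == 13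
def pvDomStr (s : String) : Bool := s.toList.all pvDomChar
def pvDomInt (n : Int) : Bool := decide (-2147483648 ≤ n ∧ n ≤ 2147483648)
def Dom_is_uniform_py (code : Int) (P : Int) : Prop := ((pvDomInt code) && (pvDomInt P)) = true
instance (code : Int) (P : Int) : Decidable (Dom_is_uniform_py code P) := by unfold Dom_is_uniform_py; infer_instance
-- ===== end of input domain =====

-- B replaces A's per-bit transition-counting loop by one bitwise expression:
-- popcount of (masked code XOR its circular right rotation over the low P bits) ≤ 2.

-- ===== PORT A =====
-- the 'for k in range(P)' loop, as a counting loop over k = 0, 1, ..., P-1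
def pvLoopA (code : Int) (stop : Nat) (k : Nat) (st : Int × Int) : Int × Int :=
  if k < stop then
    let curr_bit : Int := PySem.Int.band (code >>> k) 1
    let transitions := if curr_bit ≠ st.2 then st.1 + 1 else st.1
    pvLoopA code stop (k + 1) (transitions, curr_bit)
  else st
termination_by stop - k

def is_uniform_py (code : Int) (P : Int) : Bool :=
  let transitions : Int := 0
  let prev_bit : Int := PySem.Int.band (code >>> (P - 1).toNat) 1
  let st := pvLoopA code P.toNat 0 (transitions, prev_bit)
  decide (st.1 ≤ 2)

-- ===== PORT B =====
def is_uniform_py_alt (code : Int) (P : Int) : Bool :=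
  let c := PySem.Int.band code ((1 <<< P.toNat) - 1)
  let x := PySem.Int.bxor c (PySem.Int.bor (c >>> 1) ((PySem.Int.band c 1) <<< (P - 1).toNat))
  let x := PySem.Int.band x (x - 1)
  let x := PySem.Int.band x (x - 1)
  decide (x = 0)

-- ===== PRECONDITION & SPEC =====
-- Python A raises ValueError ("negative shift count") whenever P ≤ 0; Pre_ excludes exactly those inputs.
def Pre_is_uniform_py (_code : Int) (P : Int) : Prop := 1 ≤ P
instance (code : Int) (P : Int) : Decidable (Pre_is_uniform_py code P) := by unfold Pre_is_uniform_py; infer_instance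
def pvWitness_is_uniform_py : Int × Int := (5, 3)
def Spec_is_uniform_py (code : Int) (P : Int) (out : Bool) : Prop := out = is_uniform_py_alt code P
instance (code : Int) (P : Int) (out : Bool) : Decidable (Spec_is_uniform_py code P out) := by unfold Spec_is_uniform_py; infer_instance

-- ===== CLAIM (what is proved, stated in full; the proofs are below) =====
def Claim_equal_is_uniform_py : Prop := ∀ (code : Int) (P : Int), Dom_is_uniform_py code P → Pre_is_uniform_py code P → Spec_is_uniform_py code P (is_uniform_py code P)

-- ===== LEMMAS AND PROOFS =====

theorem pv_mask_emod (a : Int) (p : Nat) :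
    PySem.Int.band a ((2 ^ p : Nat) - 1 : Int) = a % ((2 ^ p : Nat) : Int) := by
  have h1 : (1:Nat) ≤ 2 ^ p := Nat.one_le_two_pow
  have hcast : ((2 ^ p : Nat) - 1 : Int) = ((2 ^ p - 1 : Nat) : Int) := by
    push_cast [h1]; ring
  rw [hcast]
  cases a with
  | ofNat m =>
      have : (Int.ofNat m) = ((m : Nat) : Int) := rfl
      rw [this, PySem.Int.band_natCast, Nat.and_two_pow_sub_one_eq_mod]
      push_cast
      rfl
  | negSucc m =>
      rw [PySem.Int.band.eq_1]
      have hneg : ¬ ((0:Int) ≤ Int.negSucc m) := by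
        simp [Int.negSucc_eq]; omega
      rw [if_neg hneg, if_pos (by positivity)]
      have e1 : (-(Int.negSucc m) - 1).toNat = m := by
        simp [Int.negSucc_eq]
      have e2 : (((2 ^ p - 1 : Nat) : Int)).toNat = 2 ^ p - 1 := Int.toNat_natCast _
      rw [e1, e2, Nat.and_comm, Nat.and_two_pow_sub_one_eq_mod]
      have hr : m % 2 ^ p < 2 ^ p := Nat.mod_lt _ (by positivity)
      have hd' : ((2 ^ p : Nat) : Int) * ((m / 2 ^ p : Nat) : Int) + ((m % 2 ^ p : Nat) : Int) = (m : Int) := by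
        exact_mod_cast congrArg (Nat.cast : Nat → Int) (Nat.div_add_mod m (2 ^ p))
      have hsub : ((2 ^ p - 1 - m % 2 ^ p : Nat) : Int)
          = ((2 ^ p : Nat) : Int) - 1 - ((m % 2 ^ p : Nat) : Int) := by omega
      have key : Int.negSucc m % ((2 ^ p : Nat) : Int)
          = ((2 ^ p - 1 - m % 2 ^ p : Nat) : Int) % ((2 ^ p : Nat) : Int) := by
        apply Int.modEq_iff_dvd.2
        refine ⟨((m / 2 ^ p : Nat) : Int) + 1, ?_⟩
        rw [hsub, Int.negSucc_eq]
        linear_combination -hd'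
      rw [key, Int.emod_eq_of_lt (by positivity) (by omega)]

def pvBit (n : Nat) (k : Nat) : Int := if n.testBit k then 1 else 0

theorem pv_testBit_div (n k : Nat) : n.testBit k = decide (n / 2 ^ k % 2 = 1) := by
  simp [Nat.testBit, Nat.shiftRight_eq_div_pow]; rfl

theorem pv_bit_of_code (code : Int) (p k : Nat) (hk : k < p) :
    PySem.Int.band (code >>> k) 1 = pvBit (code % ((2 ^ p : Nat) : Int)).toNat k := by
  have hM : (0:Int) < ((2 ^ p : Nat) : Int) := by positivity
  have hr0 : (0:Int) ≤ code % ((2 ^ p : Nat) : Int) := Int.emod_nonneg _ (by positivity)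
  set n : Nat := (code % ((2 ^ p : Nat) : Int)).toNat with hn
  have hrn : code % ((2 ^ p : Nat) : Int) = (n : Int) := (Int.toNat_of_nonneg hr0).symm
  rw [PySem.Int.band_one, PySem.Int.mod_eq_emod_of_pos (by norm_num), Int.shiftRight_eq_div_pow]
  have hsplit : ((2 ^ p : Nat) : Int) = ((2 ^ (p - k - 1) : Nat) : Int) * 2 * ((2 ^ k : Nat) : Int) := by
    push_cast [← pow_succ, ← pow_add]
    congr 1
    omega
  have h2 : ((2 ^ p : Nat) : Int) * (code / ((2 ^ p : Nat) : Int)) + code % ((2 ^ p : Nat) : Int) = code := by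
    rw [mul_comm]
    exact Int.ediv_mul_add_emod code ((2 ^ p : Nat) : Int)
  have hcode : code = (n : Int) + ((code / ((2 ^ p : Nat) : Int)) * (((2 ^ (p - k - 1) : Nat) : Int) * 2)) * ((2 ^ k : Nat) : Int) := by
    rw [hrn] at h2
    linear_combination -h2 + (code / ((2 ^ p : Nat) : Int)) * hsplit
  conv_lhs => rw [hcode]
  rw [Int.add_mul_ediv_right _ _ (by positivity)]
  rw [show ((n : Int) / ((2 ^ k : Nat) : Int)) = ((n / 2 ^ k : Nat) : Int) by push_cast [Int.natCast_div]; ring]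
  rw [mul_comm ((2 ^ (p - k - 1) : Nat) : Int) 2, ← mul_assoc,
      mul_comm (code / ((2 ^ p : Nat) : Int)) 2, mul_assoc,
      Int.add_mul_emod_self_left]
  rw [pvBit, pv_testBit_div]
  split_ifs with h <;> simp at h <;> omega


theorem pv_bitCount_countP (L : Nat) : ∀ n : Nat, n < 2 ^ L →
    PySem.Int.bitCount (n : Int) = List.countP (fun k => n.testBit k) (List.range L) := by
  induction L with
  | zero =>
      intro n hn
      interval_cases n
      simp [PySem.Int.bitCount_zero]
  | succ L ih =>
      intro n hn
      by_cases h0 : n = 0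
      · subst h0
        simp [PySem.Int.bitCount_zero, Nat.zero_testBit]
      · rw [PySem.Int.bitCount_natCast (Nat.pos_of_ne_zero h0)]
        rw [ih (n / 2) (by omega)]
        rw [List.range_succ_eq_map, List.countP_cons, List.countP_map]
        have hc : ((fun k => n.testBit k) ∘ Nat.succ) = fun k => (n / 2).testBit k := by
          funext k
          simp [Function.comp, Nat.testBit_succ]
        rw [hc]
        rcases Nat.mod_two_eq_zero_or_one n with h | h <;>
          · simp [Nat.testBit_zero, h]
            try omega


def pvPrevIdx (p : Nat) (k : Nat) : Nat := if k = 0 then p - 1 else k - 1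

def pvT (p : Nat) (n : Nat) (j : Nat) : Nat :=
  List.countP (fun k => n.testBit k != n.testBit (pvPrevIdx p k)) (List.range j)

def pvRot (p : Nat) (n : Nat) : Nat := n ^^^ ((n >>> 1) ||| ((n &&& 1) <<< (p - 1)))

theorem pv_xbit (p : Nat) (hp : 1 ≤ p) (n : Nat) (hn : n < 2 ^ p) (k : Nat) :
    (pvRot p n).testBit k =
      if k < p then (n.testBit k != n.testBit (if k = p - 1 then 0 else k + 1)) else false := by
  have hhi : ∀ j, p ≤ j → n.testBit j = false := fun j hj =>
    Nat.testBit_lt_two_pow (lt_of_lt_of_le hn (Nat.pow_le_pow_right (by norm_num) hj))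
  have hm : ∀ j, 1 ≤ j → (n % 2).testBit j = false := fun j hj =>
    Nat.testBit_lt_two_pow (lt_of_lt_of_le (Nat.mod_lt _ (by norm_num)) (by
      calc (2:Nat) = 2 ^ 1 := rfl
        _ ≤ 2 ^ j := Nat.pow_le_pow_right (by norm_num) hj))
  have hm0 : (n % 2).testBit 0 = n.testBit 0 := by
    rw [show (2:Nat) = 2 ^ 1 from rfl, Nat.testBit_mod_two_pow]
    simp
  unfold pvRot
  by_cases hk : k < p
  · by_cases he : k = p - 1
    · subst he
      rw [if_pos hk, if_pos rfl]
      have h1 : n.testBit (1 + (p - 1)) = false := hhi _ (by omega)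
      simp [Nat.testBit_xor, Nat.testBit_or, Nat.testBit_shiftLeft, Nat.testBit_shiftRight,
            Nat.and_one_is_mod, h1, hm0]
    · rw [if_pos hk, if_neg he]
      have h1 : 1 + k = k + 1 := by omega
      by_cases hge : p - 1 ≤ k
      · have hsub : 1 ≤ k - (p - 1) := by omega
        simp [Nat.testBit_xor, Nat.testBit_or, Nat.testBit_shiftLeft, Nat.testBit_shiftRight,
              Nat.and_one_is_mod, h1, hm _ hsub]
      · simp [Nat.testBit_xor, Nat.testBit_or, Nat.testBit_shiftLeft, Nat.testBit_shiftRight,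
              Nat.and_one_is_mod, h1, hge]
  · rw [if_neg hk]
    simp [Nat.testBit_xor, Nat.testBit_or, Nat.testBit_shiftLeft, Nat.testBit_shiftRight,
          Nat.and_one_is_mod, hhi k (by omega), hhi (1 + k) (by omega), hm (k - (p - 1)) (by omega)]

theorem pv_rot_lt (p : Nat) (hp : 1 ≤ p) (n : Nat) (hn : n < 2 ^ p) : pvRot p n < 2 ^ p := by
  unfold pvRot
  apply Nat.xor_lt_two_pow hn
  apply Nat.or_lt_two_pow
  · calc n >>> 1 ≤ n := by rw [Nat.shiftRight_eq_div_pow]; omega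
      _ < 2 ^ p := hn
  · rw [Nat.shiftLeft_eq]
    have h1 : n &&& 1 ≤ 1 := Nat.and_le_right
    calc (n &&& 1) * 2 ^ (p - 1) ≤ 1 * 2 ^ (p - 1) := Nat.mul_le_mul_right _ h1
      _ < 2 ^ p := by rw [one_mul]; exact Nat.pow_lt_pow_right (by norm_num) (by omega)

theorem pv_count_eq (p : Nat) (hp : 1 ≤ p) (n : Nat) (hn : n < 2 ^ p) :
    pvT p n p = List.countP (fun k => (pvRot p n).testBit k) (List.range p) := by
  obtain ⟨q, rfl⟩ : ∃ q, p = q + 1 := ⟨p - 1, by omega⟩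
  have hx : List.countP (fun k => (pvRot (q + 1) n).testBit k) (List.range (q + 1))
      = List.countP (fun k => n.testBit k != n.testBit (if k = q then 0 else k + 1)) (List.range (q + 1)) := by
    apply List.countP_congr
    intro k hk
    rw [List.mem_range] at hk
    rw [pv_xbit (q + 1) hp n hn k, if_pos hk]
    simp
  rw [hx]
  have hL : pvT (q + 1) n (q + 1)
      = (if (n.testBit 0 != n.testBit q) = true then 1 else 0)
        + List.countP (fun k => n.testBit (k + 1) != n.testBit k) (List.range q) := by
    unfold pvT
    rw [List.range_succ_eq_map, List.countP_cons, List.countP_map]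
    have e1 : ((fun k => n.testBit k != n.testBit (pvPrevIdx (q + 1) k)) ∘ Nat.succ)
        = fun k => n.testBit (k + 1) != n.testBit k := by
      funext k
      simp [Function.comp, pvPrevIdx]
    rw [e1]
    simp [pvPrevIdx]
    omega
  have hR : List.countP (fun k => n.testBit k != n.testBit (if k = q then 0 else k + 1)) (List.range (q + 1))
      = List.countP (fun k => n.testBit k != n.testBit (if k = q then 0 else k + 1)) (List.range q)
        + (if (n.testBit q != n.testBit 0) = true then 1 else 0) := by
    rw [List.range_succ, List.countP_append]
    simp
  have hgq : List.countP (fun k => n.testBit k != n.testBit (if k = q then 0 else k + 1)) (List.range q)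
      = List.countP (fun k => n.testBit (k + 1) != n.testBit k) (List.range q) := by
    apply List.countP_congr
    intro k hk
    rw [List.mem_range] at hk
    rw [if_neg (by omega : ¬ k = q)]
    cases h1 : n.testBit k <;> cases h2 : n.testBit (k + 1) <;> simp
  rw [hL, hR, hgq]
  have : (n.testBit 0 != n.testBit q) = (n.testBit q != n.testBit 0) := by
    cases h1 : n.testBit 0 <;> cases h2 : n.testBit q <;> simp
  rw [this]
  omega

theorem pv_fold (code : Int) (p : Nat) (n : Nat)
    (hn : n = (code % ((2 ^ p : Nat) : Int)).toNat) :
    ∀ j, j ≤ p →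
      (List.range j).foldl
        (fun (st : Int × Int) (k : Nat) =>
          let curr_bit : Int := PySem.Int.band (code >>> k) 1
          let transitions := if curr_bit ≠ st.2 then st.1 + 1 else st.1
          (transitions, curr_bit)) (0, pvBit n (p - 1))
      = (((pvT p n j : Nat) : Int), pvBit n (pvPrevIdx p j)) := by
  intro j
  induction j with
  | zero =>
      intro _
      simp [pvT, pvPrevIdx]
  | succ j ih =>
      intro hj
      rw [List.range_succ, List.foldl_append, ih (by omega)]
      simp only [List.foldl_cons, List.foldl_nil]
      show ((if PySem.Int.band (code >>> j) 1 ≠ pvBit n (pvPrevIdx p j)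
              then ((pvT p n j : Nat) : Int) + 1 else ((pvT p n j : Nat) : Int)),
            PySem.Int.band (code >>> j) 1)
          = (((pvT p n (j + 1) : Nat) : Int), pvBit n (pvPrevIdx p (j + 1)))
      have hcurr : PySem.Int.band (code >>> j) 1 = pvBit n j := by
        rw [hn]
        exact pv_bit_of_code code p j (by omega)
      have hTs : pvT p n (j + 1)
          = pvT p n j + (if (n.testBit j != n.testBit (pvPrevIdx p j)) = true then 1 else 0) := by
        unfold pvT
        rw [List.range_succ, List.countP_append]
        simp
      rw [hcurr]
      have hprev : pvPrevIdx p (j + 1) = j := by simp [pvPrevIdx]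
      rw [hprev, hTs]
      have hbit : (pvBit n j ≠ pvBit n (pvPrevIdx p j)) ↔ (n.testBit j != n.testBit (pvPrevIdx p j)) = true := by
        unfold pvBit
        cases n.testBit j <;> cases n.testBit (pvPrevIdx p j) <;> simp
      by_cases hb : (n.testBit j != n.testBit (pvPrevIdx p j)) = true
      · rw [if_pos (hbit.2 hb), if_pos hb]
        push_cast
        ring
      · rw [if_neg (fun hc => hb (hbit.1 hc)), if_neg hb]
        simp

theorem pv_loop_eq (code : Int) (stop : Nat) :
    ∀ (fuel k : Nat), fuel = stop - k → ∀ (st : Int × Int),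
      pvLoopA code stop k st
        = (List.range' k fuel).foldl
            (fun (st : Int × Int) (k : Nat) =>
              let curr_bit : Int := PySem.Int.band (code >>> k) 1
              let transitions := if curr_bit ≠ st.2 then st.1 + 1 else st.1
              (transitions, curr_bit)) st := by
  intro fuel
  induction fuel with
  | zero =>
      intro k hk st
      rw [pvLoopA, if_neg (by omega)]
      simp
  | succ fuel ih =>
      intro k hk st
      rw [pvLoopA, if_pos (by omega), List.range'_succ, List.foldl_cons]
      exact ih (k + 1) (by omega) _

-- clearing the lowest set bit: n &&& (n - 1)
def pvClear (x : Int) : Int := PySem.Int.band x (x - 1)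


theorem pv_and_pred_odd (n : Nat) (h : n % 2 = 1) : n &&& (n - 1) = n - 1 := by
  apply Nat.eq_of_testBit_eq
  intro k
  rw [Nat.testBit_and]
  cases k with
  | zero =>
      have h0 : (n - 1).testBit 0 = false := by
        rw [Nat.testBit_zero]
        simp
        omega
      rw [h0]
      simp
  | succ k =>
      rw [Nat.testBit_succ, Nat.testBit_succ]
      have hd : (n - 1) / 2 = n / 2 := by omega
      rw [hd]
      cases (n / 2).testBit k <;> simp

theorem pv_and_pred_even (n : Nat) (h0 : n % 2 = 0) (h1 : 0 < n) :
    n &&& (n - 1) = 2 * ((n / 2) &&& (n / 2 - 1)) := by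
  apply Nat.eq_of_testBit_eq
  intro k
  rw [Nat.testBit_and]
  cases k with
  | zero =>
      have ha : n.testBit 0 = false := by
        rw [Nat.testBit_zero]
        simp [h0]
      have hb : (2 * ((n / 2) &&& (n / 2 - 1))).testBit 0 = false := by
        rw [Nat.testBit_zero]
        simp
      rw [ha, hb]
      simp
  | succ k =>
      rw [Nat.testBit_succ, Nat.testBit_succ, Nat.testBit_succ]
      have hd : (n - 1) / 2 = n / 2 - 1 := by omega
      have he : 2 * ((n / 2) &&& (n / 2 - 1)) / 2 = (n / 2) &&& (n / 2 - 1) := by omega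
      rw [hd, he, Nat.testBit_and]

theorem pv_bitCount_pos (n : Nat) (h : 0 < n) : 0 < PySem.Int.bitCount (n : Int) := by
  induction n using Nat.strong_induction_on with
  | _ n ih =>
      rw [PySem.Int.bitCount_natCast h]
      rcases Nat.mod_two_eq_zero_or_one n with h2 | h2
      · have := ih (n / 2) (by omega) (by omega)
        omega
      · omega

theorem pv_bitCount_and_pred (n : Nat) (h : 0 < n) :
    PySem.Int.bitCount ((n &&& (n - 1) : Nat) : Int) = PySem.Int.bitCount (n : Int) - 1 := by
  induction n using Nat.strong_induction_on with
  | _ n ih =>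
      rcases Nat.mod_two_eq_zero_or_one n with h2 | h2
      · -- even
        rw [pv_and_pred_even n h2 h, PySem.Int.bitCount_natCast h]
        have hm : 0 < n / 2 := by omega
        have hg := ih (n / 2) (by omega) hm
        by_cases hz : (n / 2) &&& (n / 2 - 1) = 0
        · rw [hz]
          simp [PySem.Int.bitCount_zero]
          rw [hz] at hg
          simp [PySem.Int.bitCount_zero] at hg
          omega
        · have hpos : 0 < 2 * ((n / 2) &&& (n / 2 - 1)) := by omega
          rw [PySem.Int.bitCount_natCast hpos]
          have e1 : 2 * ((n / 2) &&& (n / 2 - 1)) % 2 = 0 := by omega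
          have e2 : 2 * ((n / 2) &&& (n / 2 - 1)) / 2 = (n / 2) &&& (n / 2 - 1) := by omega
          rw [e1, e2, hg]
          omega
      · -- odd
        rw [pv_and_pred_odd n h2, PySem.Int.bitCount_natCast h]
        by_cases h1 : n = 1
        · subst h1
          simp [PySem.Int.bitCount_zero]
        · have hpos : 0 < n - 1 := by omega
          rw [PySem.Int.bitCount_natCast hpos]
          have e1 : (n - 1) % 2 = 0 := by omega
          have e2 : (n - 1) / 2 = n / 2 := by omega
          rw [e1, e2]
          omega

theorem pv_band_pred_natCast (m : Nat) :
    PySem.Int.band ((m : Nat) : Int) (((m : Nat) : Int) - 1) = ((m &&& (m - 1) : Nat) : Int) := by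
  cases m with
  | zero =>
      show PySem.Int.band 0 (0 - 1) = _
      rw [PySem.Int.band_comm, PySem.Int.band_zero]
      decide
  | succ m =>
      have h1 : (((m + 1 : Nat) : Nat) : Int) - 1 = ((m : Nat) : Int) := by push_cast; ring
      rw [h1, PySem.Int.band_natCast]
      congr 2

theorem pv_kern (m : Nat) :
    (PySem.Int.band ((m &&& (m - 1) : Nat) : Int) (((m &&& (m - 1) : Nat) : Int) - 1) = 0
      ↔ PySem.Int.bitCount (m : Int) ≤ 2) := by
  rw [pv_band_pred_natCast]
  set m1 := m &&& (m - 1) with hm1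
  set m2 := m1 &&& (m1 - 1) with hm2
  have hcast : (((m2 : Nat) : Int) = 0) ↔ m2 = 0 := by omega
  rw [hcast]
  by_cases h0 : m = 0
  · subst h0
    simp [hm1, hm2, PySem.Int.bitCount_zero] at *
  · have k1 := pv_bitCount_and_pred m (by omega)
    by_cases h1 : m1 = 0
    · have : PySem.Int.bitCount ((m : Nat) : Int) = 1 := by
        rw [← hm1] at k1
        rw [h1] at k1
        simp [PySem.Int.bitCount_zero] at k1
        have := pv_bitCount_pos m (by omega)
        omega
      simp [h1, hm2, this]
    · have k2 := pv_bitCount_and_pred m1 (by omega)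
      rw [← hm1] at k1
      rw [← hm2] at k2
      have hp1 := pv_bitCount_pos m1 (by omega)
      constructor
      · intro h
        rw [h] at k2
        simp [PySem.Int.bitCount_zero] at k2
        omega
      · intro h
        by_contra hne
        have hp2 := pv_bitCount_pos m2 (by omega)
        omega

theorem pv_A_char (code : Int) (P : Int) (hP : 1 ≤ P) :
    is_uniform_py code P
      = decide (pvT P.toNat ((code % ((2 ^ P.toNat : Nat) : Int)).toNat) P.toNat ≤ 2) := by
  unfold is_uniform_py
  show decide ((pvLoopA code P.toNat 0 (0, PySem.Int.band (code >>> (P - 1).toNat) 1)).1 ≤ 2) = _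
  have hp : 1 ≤ P.toNat := by omega
  set p := P.toNat with hpdef
  set n : Nat := (code % ((2 ^ p : Nat) : Int)).toNat with hn
  have hP1 : (P - 1).toNat = p - 1 := by omega
  rw [hP1]
  have hprev : PySem.Int.band (code >>> (p - 1 : Nat)) 1 = pvBit n (p - 1) := by
    rw [hn]
    exact pv_bit_of_code code p (p - 1) (by omega)
  rw [hprev, pv_loop_eq code p p 0 (by omega) _, ← List.range_eq_range',
      pv_fold code p n hn p (le_refl p)]
  show decide (((pvT p n p : Nat) : Int) ≤ 2) = decide (pvT p n p ≤ 2)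
  exact decide_eq_decide.mpr (by exact_mod_cast Iff.rfl)

theorem pv_B_char (code : Int) (P : Int) (hP : 1 ≤ P) :
    is_uniform_py_alt code P
      = decide (List.countP (fun k => (pvRot P.toNat ((code % ((2 ^ P.toNat : Nat) : Int)).toNat)).testBit k)
          (List.range P.toNat) ≤ 2) := by
  unfold is_uniform_py_alt
  show decide (pvClear (pvClear (PySem.Int.bxor (PySem.Int.band code ((1 <<< P.toNat) - 1))
      (PySem.Int.bor ((PySem.Int.band code ((1 <<< P.toNat) - 1)) >>> 1)
        ((PySem.Int.band (PySem.Int.band code ((1 <<< P.toNat) - 1)) 1) <<< (P - 1).toNat)))) = 0) = _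
  have hp : 1 ≤ P.toNat := by omega
  set p := P.toNat with hpdef
  set n : Nat := (code % ((2 ^ p : Nat) : Int)).toNat with hn
  have hnlt : n < 2 ^ p := by
    have h1 : code % ((2 ^ p : Nat) : Int) < ((2 ^ p : Nat) : Int) :=
      Int.emod_lt_of_pos _ (by positivity)
    omega
  have hmask : (((1 <<< p : Nat) : Int)) - 1 = ((2 ^ p : Nat) : Int) - 1 := by
    rw [Nat.shiftLeft_eq, one_mul]
  rw [hmask, pv_mask_emod code p]
  have hrn : code % ((2 ^ p : Nat) : Int) = ((n : Nat) : Int) := by omega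
  rw [hrn]
  have hP1 : (P - 1).toNat = p - 1 := by omega
  rw [hP1]
  have hband : PySem.Int.band ((n : Nat) : Int) 1 = (((n &&& 1 : Nat) : Nat) : Int) := by
    have h1 : (1 : Int) = ((1 : Nat) : Int) := rfl
    rw [h1, PySem.Int.band_natCast]
  have hshr : ((n : Nat) : Int) >>> (1 : Int) = (((n >>> 1 : Nat) : Nat) : Int) := by
    rw [show (1 : Int) = ((1 : Nat) : Int) from rfl, Int.shiftRight_natCast_right,
        Int.natCast_shiftRight]
  have hshl : (((n &&& 1 : Nat) : Nat) : Int) <<< (p - 1 : Nat) = ((((n &&& 1) <<< (p - 1) : Nat) : Nat) : Int) := by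
    rw [Int.natCast_shiftLeft]
  rw [hband, hshr, hshl, PySem.Int.bor_natCast, PySem.Int.bxor_natCast]
  rw [show ((n ^^^ (n >>> 1 ||| (n &&& 1) <<< (p - 1)) : Nat) : Int) = ((pvRot p n : Nat) : Int) from rfl]
  unfold pvClear
  rw [pv_band_pred_natCast (pvRot p n)]
  rw [← pv_bitCount_countP p (pvRot p n) (pv_rot_lt p hp n hnlt)]
  exact decide_eq_decide.mpr (pv_kern (pvRot p n))

-- ===== VERDICT (by name: the statement is the Claim_ definition above) =====
theorem is_uniform_py_spec : Claim_equal_is_uniform_py := by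
  intro code P _ hPre
  have hP : 1 ≤ P := hPre
  unfold Spec_is_uniform_py
  rw [pv_A_char code P hP, pv_B_char code P hP,
      pv_count_eq P.toNat (by omega) _ (by
        have h1 : code % ((2 ^ P.toNat : Nat) : Int) < ((2 ^ P.toNat : Nat) : Int) :=
          Int.emod_lt_of_pos _ (by positivity)
        omega)]
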